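-- pv_equiv track=rewrite | github.com/martinstaebler/codewars | Word_Mesh.py | word_mesh
-- ===== SOURCE A (Python) =====
-- def word_mesh(words):
--     solution_string = ""
--     for i in range(0, len(words)-1):
--         counter = 0
--         word_slice = ""
--         while counter <= len(words[i]) and counter <= len(words[i+1]):
--             if words[i][-1 * counter:] == words[i+1][:counter]:
--                 word_slice = words[i][-1 * counter:]
--             counter += 1
--
--         if len(word_slice) > 0:
--             solution_string += word_slice
--         else:
--             return "failed to mesh"
--
--     return solution_string
-- ===== SOURCE B (Python) =====
-- def _overlap(a, b):
--     # longest k with a[-k:] == b[:k], via the KMP failure function of b + sep + a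
--     s = b + "\x00" + a
--     pi = [0] * len(s)
--     k = 0
--     for i in range(1, len(s)):
--         while k > 0 and s[i] != s[k]:
--             k = pi[k - 1]
--         if s[i] == s[k]:
--             k += 1
--         pi[i] = k
--     return k
--
-- def word_mesh(words):
--     pieces = []
--     for a, b in zip(words, words[1:]):
--         k = _overlap(a, b)
--         if k == 0:
--             return "failed to mesh"
--         pieces.append(b[:k])
--     return "".join(pieces)
-- ===== Notes on version B (the rewrite author's own statement) =====
-- stated objective: alternative
-- what changed: Per consecutive pair, the longest suffix/prefix overlap is computed with the KMP failure function of prefix-word + separator + suffix-word in a single pass, instead of A's loop that compares a length-k suffix slice against a length-k prefix slice for every k; pieces are collected in a list and joined once.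
import Mathlib
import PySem

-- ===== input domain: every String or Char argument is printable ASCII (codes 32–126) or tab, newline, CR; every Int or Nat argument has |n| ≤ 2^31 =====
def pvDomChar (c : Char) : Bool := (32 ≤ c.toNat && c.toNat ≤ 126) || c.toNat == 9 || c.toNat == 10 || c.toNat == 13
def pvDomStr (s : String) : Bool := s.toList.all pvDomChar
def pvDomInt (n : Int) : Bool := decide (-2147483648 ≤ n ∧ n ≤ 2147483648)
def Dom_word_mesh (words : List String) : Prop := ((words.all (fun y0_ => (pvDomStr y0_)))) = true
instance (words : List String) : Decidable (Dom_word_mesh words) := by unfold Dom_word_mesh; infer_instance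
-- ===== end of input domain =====

-- B computes each pair's longest suffix/prefix overlap with the KMP failure function of
-- b ++ NUL ++ a (NUL is outside the ASCII domain, so it occurs in neither word), instead of
-- A's loop comparing a suffix slice against a prefix slice for every candidate length.

-- ===== PORT A =====
-- the body of A's inner while loop: counter runs 0,1,…,min(len a, len b) (the while condition
-- 'counter <= len(words[i]) and counter <= len(words[i+1])' with counter += 1), so the while loop
-- is rendered as a fold over that range; slices are PySem.List.slice (Python-exact).
def wmPairA (a b : List Char) : List Char :=
  (List.range (min a.length b.length + 1)).foldl
    (fun ws (c : Nat) =>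
      if PySem.List.slice a (some ((-1) * (c : Int))) none =
         PySem.List.slice b none (some (c : Int))
      then PySem.List.slice a (some ((-1) * (c : Int))) none
      else ws) []

-- the outer 'for i in range(0, len(words)-1)' walking words[i], words[i+1]; the early
-- 'return "failed to mesh"' is rendered as Option (none = early return).
def wmLoopA (sol : List Char) : List (List Char) → Option (List Char)
  | [] => some sol
  | [_] => some sol
  | a :: b :: rest =>
      let ws := wmPairA a b
      if 0 < ws.length then wmLoopA (sol ++ ws) (b :: rest) else none

def word_mesh (words : List String) : String :=
  match wmLoopA [] (words.map String.toList) with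
  | some sol => String.ofList sol
  | none => "failed to mesh"

-- ===== PORT B =====
-- 'while k > 0 and s[i] != s[k]: k = pi[k-1]'; fuel = the entering k (each step strictly
-- decreases k when pi is a KMP failure table, so fuel k always suffices; proved below).
-- s[i]/s[k]/pi[k-1] are always in range here, so getD is exact.
def kmpWhile (s : List Char) (pi : List Nat) (c : Char) : Nat → Nat → Nat
  | 0, k => k
  | fuel + 1, k =>
      if 0 < k ∧ ¬ c = s.getD k ' ' then kmpWhile s pi c fuel (pi.getD (k - 1) 0) else k

-- 'pi = [0]*len(s); k = 0; for i in range(1, len(s)): …'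
def kmpFold (s : List Char) : List Nat × Nat :=
  (List.range' 1 (s.length - 1)).foldl
    (fun st i =>
      let c := s.getD i ' '
      let k1 := kmpWhile s st.1 c st.2 st.2
      let k2 := if c = s.getD k1 ' ' then k1 + 1 else k1
      (st.1.set i k2, k2))
    (List.replicate s.length 0, 0)

def wmOverlapB (a b : List Char) : Nat := (kmpFold (b ++ '\x00' :: a)).2

-- 'for a, b in zip(words, words[1:])' building pieces, with the early return as Option
def wmPiecesB : List (List Char × List Char) → Option (List (List Char))
  | [] => some []
  | (a, b) :: rest =>
      let k := wmOverlapB a b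
      if k = 0 then none
      else match wmPiecesB rest with
           | some ps => some (b.take k :: ps)
           | none => none

def word_mesh_alt (words : List String) : String :=
  let ws := words.map String.toList
  match wmPiecesB (ws.zip ws.tail) with
  | some ps => String.ofList (PySem.Chars.join [] ps)   -- "".join(pieces)
  | none => "failed to mesh"

-- ===== PRECONDITION & SPEC =====
def Spec_word_mesh (words : List String) (out : String) : Prop := out = word_mesh_alt words
instance (words : List String) (out : String) : Decidable (Spec_word_mesh words out) := by unfold Spec_word_mesh; infer_instance

-- ===== CLAIM (what is proved, stated in full; the proofs are below) =====
def Claim_equal_word_mesh : Prop := ∀ (words : List String), Dom_word_mesh words → Spec_word_mesh words (word_mesh words)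

-- ===== LEMMAS AND PROOFS =====

-- `Qb a b k` : the length-k suffix of a equals the length-k prefix of b
def Qb (a b : List Char) (k : Nat) : Bool := a.drop (a.length - k) == b.take k
-- the longest overlap of the pair (0 if none)
def mm (a b : List Char) : Nat := Nat.findGreatest (fun k => Qb a b k = true) (min a.length b.length)

-- `isBb u j` : the length-j prefix of u equals the length-j suffix of u (a border of u)
def isBb (u : List Char) (j : Nat) : Bool := j ≤ u.length && u.take j == u.drop (u.length - j)
-- length of the longest proper border of u
def mB (u : List Char) : Nat := Nat.findGreatest (fun j => isBb u j = true) (u.length - 1)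

lemma isBb_zero (u : List Char) : isBb u 0 = true := by simp [isBb]

lemma isBb_mB (u : List Char) : isBb u (mB u) = true := by
  unfold mB
  exact Nat.findGreatest_spec (P := fun j => isBb u j = true) (Nat.zero_le _) (isBb_zero u)

lemma mB_le (u : List Char) : mB u ≤ u.length - 1 := Nat.findGreatest_le _

lemma mB_lt (u : List Char) (h : 1 ≤ u.length) : mB u < u.length := by
  have := mB_le u; omega

lemma mB_max (u : List Char) (j : Nat) (hj : isBb u j = true) (hlt : j < u.length) : j ≤ mB u :=
  Nat.le_findGreatest (by omega) hj

-- a border of a border of u is a border of u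
lemma isBb_trans_up (u : List Char) (k j : Nat) (hk : isBb u k = true)
    (hj : isBb (u.take k) j = true) : isBb u j = true := by
  simp only [isBb, Bool.and_eq_true, decide_eq_true_eq, beq_iff_eq, List.length_take] at *
  obtain ⟨hk1, hk2⟩ := hk
  obtain ⟨hj1, hj2⟩ := hj
  have hj1' : j ≤ k := le_trans hj1 (min_le_left _ _)
  refine ⟨by omega, ?_⟩
  rw [List.take_take, min_eq_left hj1'] at hj2
  rw [hj2, min_eq_left hk1, hk2, List.drop_drop]
  congr 1
  omega

-- a shorter border of u is a border of the longer border
lemma isBb_down (u : List Char) (k j : Nat) (hk : isBb u k = true) (hj : isBb u j = true)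
    (hjk : j ≤ k) : isBb (u.take k) j = true := by
  simp only [isBb, Bool.and_eq_true, decide_eq_true_eq, beq_iff_eq, List.length_take] at *
  obtain ⟨hk1, hk2⟩ := hk
  obtain ⟨hj1, hj2⟩ := hj
  refine ⟨by omega, ?_⟩
  rw [List.take_take, min_eq_left hjk, hj2, min_eq_left hk1, hk2, List.drop_drop]
  congr 1
  omega

-- border extension: borders of u ++ [c] of length j+1 ↔ borders j of u followed by c
lemma isBb_ext (u : List Char) (c : Char) (j : Nat) (hj : j + 1 ≤ u.length) :
    isBb (u ++ [c]) (j + 1) = true ↔ (isBb u j = true ∧ u.getD j ' ' = c) := by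
  have hjlt : j < u.length := by omega
  have hgd : u.getD j ' ' = u[j] := List.getD_eq_getElem _ _ hjlt
  have h1 : (u ++ [c]).take (j + 1) = u.take j ++ [u[j]] := by
    rw [List.take_append_of_le_length hj, List.take_add_one]
    simp [List.getElem?_eq_getElem hjlt]
  have h2 : (u ++ [c]).drop ((u ++ [c]).length - (j + 1)) = u.drop (u.length - j) ++ [c] := by
    simp only [List.length_append, List.length_cons, List.length_nil]
    have he : u.length + (0 + 1) - (j + 1) = u.length - j := by omega
    rw [he, List.drop_append_of_le_length (by omega)]
  simp only [isBb, Bool.and_eq_true, decide_eq_true_eq, beq_iff_eq]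
  rw [h1, h2, hgd]
  constructor
  · rintro ⟨-, heq⟩
    obtain ⟨h3, h4⟩ := List.append_inj' heq (by simp)
    simp only [List.cons.injEq, and_true] at h4
    exact ⟨⟨by omega, h3⟩, h4⟩
  · rintro ⟨⟨-, h3⟩, h4⟩
    exact ⟨by simp; omega, by rw [h3, h4]⟩

-- the KMP inner while loop: from a border k of u, it finds the largest border r of u
-- that is followed by c (or 0), provided pi holds the failure values of u's prefixes
lemma kmpWhile_spec (s : List Char) (pi : List Nat) (c : Char) (u : List Char)
    (hchar : ∀ j, j < u.length → s.getD j ' ' = u.getD j ' ')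
    (hpi : ∀ t, 1 ≤ t → t ≤ u.length → pi.getD (t - 1) 0 = mB (u.take t)) :
    ∀ fuel k, k ≤ fuel → isBb u k = true → k < u.length →
    (∀ j, isBb u j = true → j < u.length → u.getD j ' ' = c → j ≤ k) →
    (isBb u (kmpWhile s pi c fuel k) = true ∧ kmpWhile s pi c fuel k < u.length ∧
     (∀ j, isBb u j = true → j < u.length → u.getD j ' ' = c → j ≤ kmpWhile s pi c fuel k) ∧
     (kmpWhile s pi c fuel k = 0 ∨ u.getD (kmpWhile s pi c fuel k) ' ' = c)) := by
  intro fuel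
  induction fuel with
  | zero =>
    intro k hk hbk hklt hmax
    have hk0 : k = 0 := by omega
    subst hk0
    exact ⟨hbk, hklt, hmax, Or.inl rfl⟩
  | succ fuel ih =>
    intro k hk hbk hklt hmax
    simp only [kmpWhile]
    by_cases hcond : 0 < k ∧ ¬ c = s.getD k ' '
    · rw [if_pos hcond]
      obtain ⟨hkpos, hne⟩ := hcond
      have hsu : s.getD k ' ' = u.getD k ' ' := hchar k hklt
      have hpik : pi.getD (k - 1) 0 = mB (u.take k) := hpi k (by omega) (by omega)
      have hlen : (u.take k).length = k := by simp; omega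
      have hmble := mB_le (u.take k)
      rw [hlen] at hmble
      have hbk' : isBb u (pi.getD (k - 1) 0) = true := by
        rw [hpik]; exact isBb_trans_up u k _ hbk (isBb_mB _)
      have hmax' : ∀ j, isBb u j = true → j < u.length → u.getD j ' ' = c →
          j ≤ pi.getD (k - 1) 0 := by
        intro j hj hjlt hjc
        have hjk : j ≤ k := hmax j hj hjlt hjc
        have hjne : j ≠ k := by
          rintro rfl
          rw [hsu] at hne
          exact hne hjc.symm
        rw [hpik]
        exact mB_max _ j (isBb_down u k j hbk hj hjk) (by rw [hlen]; omega)
      exact ih (pi.getD (k - 1) 0) (by omega) hbk' (by omega) hmax'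
    · rw [if_neg hcond]
      refine ⟨hbk, hklt, hmax, ?_⟩
      by_cases hk0 : k = 0
      · exact Or.inl hk0
      · right
        rw [not_and_or, not_not] at hcond
        have hcond' : c = s.getD k ' ' := hcond.resolve_left (by omega)
        rw [← hchar k hklt, ← hcond']

-- one KMP step computes the longest proper border of u ++ [c]
lemma mB_ext (u : List Char) (c : Char) (r : Nat)
    (hr : isBb u r = true) (hrlt : r < u.length)
    (hmax : ∀ j, isBb u j = true → j < u.length → u.getD j ' ' = c → j ≤ r)
    (hstop : r = 0 ∨ u.getD r ' ' = c) :
    mB (u ++ [c]) = if c = u.getD r ' ' then r + 1 else 0 := by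
  have hlen1 : (u ++ [c]).length = u.length + 1 := by simp
  by_cases hc : c = u.getD r ' '
  · rw [if_pos hc]
    apply Nat.le_antisymm
    · have hg := mB_le (u ++ [c])
      rw [hlen1] at hg
      rcases Nat.eq_zero_or_pos (mB (u ++ [c])) with h0 | hpos
      · omega
      · obtain ⟨j, hj⟩ : ∃ j, mB (u ++ [c]) = j + 1 := ⟨mB (u ++ [c]) - 1, by omega⟩
        have hb := isBb_mB (u ++ [c])
        rw [hj] at hb hg ⊢
        have hx := (isBb_ext u c j (by omega)).mp hb
        have hjr := hmax j hx.1 (by omega) hx.2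
        omega
    · apply mB_max
      · exact (isBb_ext u c r hrlt).mpr ⟨hr, hc.symm⟩
      · omega
  · rw [if_neg hc]
    have hr0 : r = 0 := by
      rcases hstop with h | h
      · exact h
      · exact absurd h.symm hc
    by_contra hne
    have hpos : 0 < mB (u ++ [c]) := Nat.pos_of_ne_zero hne
    have hg := mB_le (u ++ [c])
    rw [hlen1] at hg
    obtain ⟨j, hj⟩ : ∃ j, mB (u ++ [c]) = j + 1 := ⟨mB (u ++ [c]) - 1, by omega⟩
    have hb := isBb_mB (u ++ [c])
    rw [hj] at hb hg
    have hx := (isBb_ext u c j (by omega)).mp hb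
    have hjr := hmax j hx.1 (by omega) hx.2
    have hj0 : j = 0 := by omega
    subst hj0
    rw [hr0] at hc
    exact hc hx.2.symm

-- the body of kmpFold's for-loop, named for the invariant proof
def wmStep (s : List Char) (st : List Nat × Nat) (i : Nat) : List Nat × Nat :=
  let c := s.getD i ' '
  let k1 := kmpWhile s st.1 c st.2 st.2
  let k2 := if c = s.getD k1 ' ' then k1 + 1 else k1
  (st.1.set i k2, k2)

lemma kmpFold_eq_foldl (s : List Char) :
    kmpFold s = (List.range' 1 (s.length - 1)).foldl (wmStep s) (List.replicate s.length 0, 0) := rfl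

lemma getD_take (s : List Char) (i j : Nat) (h : j < i) :
    (s.take i).getD j ' ' = s.getD j ' ' := by
  simp [List.getD, h]

lemma getD_set_self (l : List Nat) (i k : Nat) (h : i < l.length) :
    (l.set i k).getD i 0 = k := by
  simp [List.getD, h]

lemma getD_set_ne (l : List Nat) (i j k : Nat) (h : i ≠ j) :
    (l.set i k).getD j 0 = l.getD j 0 := by
  simp [List.getD, List.getElem?_set_ne h]

lemma mB_take_one (s : List Char) (hs : 1 ≤ s.length) : mB (s.take 1) = 0 := by
  have h := mB_le (s.take 1)
  rw [List.length_take] at h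
  omega

-- main loop invariant of kmpFold
lemma kmpFold_inv (s : List Char) (hs : 1 ≤ s.length) (m : Nat) (hm : 1 + m ≤ s.length) :
    ((List.range' 1 m).foldl (wmStep s) (List.replicate s.length 0, 0)).1.length = s.length ∧
    ((List.range' 1 m).foldl (wmStep s) (List.replicate s.length 0, 0)).2 = mB (s.take (1 + m)) ∧
      (∀ t, 1 ≤ t → t ≤ 1 + m →
        ((List.range' 1 m).foldl (wmStep s) (List.replicate s.length 0, 0)).1.getD (t - 1) 0 =
          mB (s.take t)) := by
  induction m with
  | zero =>
    refine ⟨by simp, by simpa using (mB_take_one s hs).symm, ?_⟩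
    intro t ht1 ht2
    have ht : t = 1 := by omega
    subst ht
    simpa using (mB_take_one s hs).symm
  | succ m ih =>
    obtain ⟨ihlen, ihk, ihpi⟩ := ih (by omega)
    set st := (List.range' 1 m).foldl (wmStep s) (List.replicate s.length 0, 0) with hst
    have hconcat : List.range' 1 (m + 1) = List.range' 1 m ++ [1 + 1 * m] := List.range'_concat
    have hfold : (List.range' 1 (m + 1)).foldl (wmStep s) (List.replicate s.length 0, 0) =
        wmStep s st (1 + m) := by
      rw [hconcat, List.foldl_append]
      simp [hst]
    set i := 1 + m with hi
    have hilt : i < s.length := by omega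
    have hulen : (s.take i).length = i := by simp; omega
    -- apply the while-loop lemma with u = s.take i
    have hw := kmpWhile_spec s st.1 (s.getD i ' ') (s.take i)
      (fun j hj => (getD_take s i j (by omega)).symm)
      (fun t ht1 ht2 => by
        rw [List.take_take, min_eq_left (by omega : t ≤ i)]
        exact ihpi t ht1 (by omega))
      st.2 st.2 (le_refl _)
      (by rw [ihk]; exact isBb_mB _)
      (by rw [ihk]; exact mB_lt _ (by rw [hulen]; omega))
      (by
        intro j hj hjlt hjc
        rw [ihk]
        exact mB_max _ j hj hjlt)
    obtain ⟨hwb, hwlt, hwmax, hwstop⟩ := hw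
    set r := kmpWhile s st.1 (s.getD i ' ') st.2 st.2 with hr
    have hsr : s.getD r ' ' = (s.take i).getD r ' ' := (getD_take s i r (by omega)).symm
    -- the extended prefix
    have htake : s.take (i + 1) = s.take i ++ [s.getD i ' '] := by
      rw [List.take_add_one, List.getElem?_eq_getElem hilt]
      simp [List.getD, List.getElem?_eq_getElem hilt]
    have hmb : mB (s.take (i + 1)) =
        if s.getD i ' ' = (s.take i).getD r ' ' then r + 1 else 0 := by
      rw [htake]
      exact mB_ext (s.take i) (s.getD i ' ') r hwb (by omega) hwmax hwstop
    have hk2 : (if s.getD i ' ' = s.getD r ' ' then r + 1 else r) = mB (s.take (i + 1)) := by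
      rw [hmb, hsr]
      by_cases hc : s.getD i ' ' = (s.take i).getD r ' '
      · rw [if_pos hc, if_pos hc]
      · rw [if_neg hc, if_neg hc]
        rcases hwstop with h0 | hcc
        · exact h0
        · exact absurd hcc.symm hc
    rw [hfold]
    refine ⟨by simp [wmStep, ihlen], ?_, ?_⟩
    · show (if s.getD i ' ' = s.getD r ' ' then r + 1 else r) = mB (s.take (1 + (m + 1)))
      rw [hk2]
      have h3 : 1 + (m + 1) = i + 1 := by omega
      rw [h3]
    · intro t ht1 ht2
      show (st.1.set i _).getD (t - 1) 0 = mB (s.take t)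
      by_cases hti : t = i + 1
      · subst hti
        simp only [Nat.add_sub_cancel]
        rw [getD_set_self st.1 i _ (by omega), hk2]
      · rw [getD_set_ne st.1 i (t - 1) _ (by omega)]
        exact ihpi t ht1 (by omega)

lemma kmpFold_eq_mB (s : List Char) (hs : 1 ≤ s.length) : (kmpFold s).2 = mB s := by
  rw [kmpFold_eq_foldl]
  obtain ⟨-, hk, -⟩ := kmpFold_inv s hs (s.length - 1) (by omega)
  rw [hk]
  have h2 : 1 + (s.length - 1) = s.length := by omega
  rw [h2, List.take_length]

-- borders of b ++ NUL ++ a of length ≤ min are exactly the overlaps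
lemma isBb_sep_iff (a b : List Char) (j : Nat) (hj : j ≤ min a.length b.length) :
    isBb (b ++ '\x00' :: a) j = Qb a b j := by
  have hja : j ≤ a.length := by omega
  have hjb : j ≤ b.length := by omega
  have h1 : (b ++ '\x00' :: a).take j = b.take j := List.take_append_of_le_length hjb
  have h2 : (b ++ '\x00' :: a).drop ((b ++ '\x00' :: a).length - j) = a.drop (a.length - j) := by
    have hl : (b ++ '\x00' :: a).length - j = b.length + (a.length - j + 1) := by simp; omega
    rw [hl, List.drop_append]
    have h3 : b.length + (a.length - j + 1) - b.length = a.length - j + 1 := by omega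
    rw [h3, List.drop_of_length_le (by omega), List.drop_succ_cons]
    simp
  rw [Bool.eq_iff_iff]
  simp only [isBb, Qb, Bool.and_eq_true, decide_eq_true_eq, beq_iff_eq, h1, h2]
  constructor
  · rintro ⟨-, h⟩
    exact h.symm
  · intro h
    exact ⟨by simp; omega, h.symm⟩

-- no border of b ++ NUL ++ a is longer than min (NUL occurs in neither word)
lemma isBb_sep_big (a b : List Char) (ha : '\x00' ∉ a) (hb : '\x00' ∉ b) (j : Nat)
    (hjmin : min a.length b.length < j) (hjlt : j < (b ++ '\x00' :: a).length) :
    isBb (b ++ '\x00' :: a) j = false := by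
  rw [Bool.eq_false_iff]
  intro h
  simp only [isBb, Bool.and_eq_true, decide_eq_true_eq, beq_iff_eq] at h
  obtain ⟨hle, heq⟩ := h
  have hN : (b ++ '\x00' :: a).length = b.length + a.length + 1 := by simp; omega
  by_cases hjb : j ≤ b.length
  · -- j exceeds a: the length-j suffix contains the separator, the prefix lies inside b
    have hja : a.length < j := by omega
    have h1 : (b ++ '\x00' :: a).take j = b.take j := List.take_append_of_le_length hjb
    have h2 : (b ++ '\x00' :: a).drop ((b ++ '\x00' :: a).length - j) =
        (b.drop ((b ++ '\x00' :: a).length - j)) ++ '\x00' :: a := by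
      rw [List.drop_append]
      have h0 : (b ++ '\x00' :: a).length - j - b.length = 0 := by simp; omega
      rw [h0, List.drop_zero]
    rw [h1, h2] at heq
    have : '\x00' ∈ b.take j := by
      rw [heq]
      simp
    exact hb (List.mem_of_mem_take this)
  · by_cases hja2 : j ≤ a.length
    · -- j exceeds b: the length-j prefix contains the separator, the suffix lies inside a
      have h1 : '\x00' ∈ (b ++ '\x00' :: a).take j := by
        rw [List.take_append]
        have hx : j - b.length = (j - b.length - 1) + 1 := by omega
        rw [hx, List.take_succ_cons]
        simp
      have h2 : (b ++ '\x00' :: a).drop ((b ++ '\x00' :: a).length - j) = a.drop (a.length - j) := by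
        have hl : (b ++ '\x00' :: a).length - j = b.length + (a.length - j + 1) := by simp; omega
        rw [hl, List.drop_append]
        have h3 : b.length + (a.length - j + 1) - b.length = a.length - j + 1 := by omega
        rw [h3, List.drop_of_length_le (by omega), List.drop_succ_cons]
        simp
      rw [heq, h2] at h1
      exact ha (List.mem_of_mem_drop h1)
    · -- j exceeds both: compare the separator position on both sides
      have hblt : b.length < j := by omega
      have halt : a.length < j := by omega
      set u := b ++ '\x00' :: a with hu
      have e0 : (u.take j).getD b.length ' ' = (u.drop (u.length - j)).getD b.length ' ' := by
        rw [heq]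
      have e1 : (u.take j).getD b.length ' ' = '\x00' := by
        rw [getD_take u j b.length hblt]
        simp only [List.getD, hu]
        rw [List.getElem?_append_right (le_refl b.length)]
        simp
      have e2 : (u.drop (u.length - j)).getD b.length ' ' = u.getD (u.length - j + b.length) ' ' := by
        simp [List.getD, List.getElem?_drop]
      have hidx : u.length - j + b.length - b.length - 1 < a.length := by omega
      have e3 : u.getD (u.length - j + b.length) ' ' =
          a.getD (u.length - j + b.length - b.length - 1) ' ' := by
        simp only [List.getD, hu]
        rw [List.getElem?_append_right (by omega)]
        have hx : u.length - j + b.length - b.length = (u.length - j + b.length - b.length - 1) + 1 := by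
          omega
        rw [hu] at hx
        rw [hx]
        simp
      have : '\x00' ∈ a := by
        rw [e1, e2, e3] at e0
        rw [e0]
        rw [List.getD_eq_getElem a ' ' hidx]
        exact List.getElem_mem hidx
      exact ha this

lemma Qb_zero (a b : List Char) : Qb a b 0 = true := by simp [Qb]

lemma mm_le (a b : List Char) : mm a b ≤ min a.length b.length := Nat.findGreatest_le _

lemma Qb_mm (a b : List Char) : Qb a b (mm a b) = true := by
  unfold mm
  exact Nat.findGreatest_spec (P := fun k => Qb a b k = true) (Nat.zero_le _) (Qb_zero a b)

lemma mB_sep (a b : List Char) (ha : '\x00' ∉ a) (hb : '\x00' ∉ b) :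
    mB (b ++ '\x00' :: a) = mm a b := by
  have hN : (b ++ '\x00' :: a).length = b.length + (a.length + 1) := by simp
  apply Nat.le_antisymm
  · have hbm := isBb_mB (b ++ '\x00' :: a)
    have hlt := mB_lt (b ++ '\x00' :: a) (by simp; omega)
    have hle_min : mB (b ++ '\x00' :: a) ≤ min a.length b.length := by
      by_contra hgt
      rw [isBb_sep_big a b ha hb _ (by omega) hlt] at hbm
      exact Bool.false_ne_true hbm
    rw [isBb_sep_iff a b _ hle_min] at hbm
    exact Nat.le_findGreatest hle_min hbm
  · rcases Nat.eq_zero_or_pos (mm a b) with h0 | hpos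
    · omega
    · apply mB_max
      · rw [isBb_sep_iff a b _ (mm_le a b)]
        exact Qb_mm a b
      · have := mm_le a b
        omega

lemma overlapB_eq (a b : List Char) (ha : '\x00' ∉ a) (hb : '\x00' ∉ b) :
    wmOverlapB a b = mm a b := by
  unfold wmOverlapB
  rw [kmpFold_eq_mB _ (by simp; omega), mB_sep a b ha hb]

-- A's inner loop keeps the suffix slice of the last (largest) matching k
lemma sliceA_pos (a : List Char) (k : Nat) (hk : 0 < k) :
    PySem.List.slice a (some ((-1) * (k : Int))) none = a.drop (a.length - k) := by
  rw [neg_one_mul]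
  exact PySem.List.slice_from_neg_natCast a k hk

-- A's inner loop over counter = 1..n keeps the slice of the last (largest) matching counter
lemma pairA_fold (a b : List Char) (n : Nat) :
    (List.range' 1 n).foldl
      (fun ws (c : Nat) =>
        if PySem.List.slice a (some ((-1) * (c : Int))) none =
           PySem.List.slice b none (some (c : Int))
        then PySem.List.slice a (some ((-1) * (c : Int))) none
        else ws) [] =
    (if Nat.findGreatest (fun k => Qb a b k = true) n = 0 then []
     else a.drop (a.length - Nat.findGreatest (fun k => Qb a b k = true) n)) := by
  induction n with
  | zero => simp
  | succ n ih =>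
    have hconcat : List.range' 1 (n + 1) = List.range' 1 n ++ [1 + 1 * n] := List.range'_concat
    rw [hconcat, List.foldl_append, ih]
    have h1n : (1 + 1 * n : Nat) = n + 1 := by omega
    rw [h1n]
    have hsl : PySem.List.slice a (some ((-1) * ((n + 1 : Nat) : Int))) none =
        a.drop (a.length - (n + 1)) := sliceA_pos a (n + 1) (by omega)
    have hsr : PySem.List.slice b none (some ((n + 1 : Nat) : Int)) = b.take (n + 1) :=
      PySem.List.slice_to_natCast b (n + 1)
    have hfg : Nat.findGreatest (fun k => Qb a b k = true) (n + 1) =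
        if Qb a b (n + 1) = true then n + 1 else Nat.findGreatest (fun k => Qb a b k = true) n :=
      Nat.findGreatest_succ n
    simp only [List.foldl_cons, List.foldl_nil, hsl, hsr]
    by_cases hq : Qb a b (n + 1) = true
    · have hcond : a.drop (a.length - (n + 1)) = b.take (n + 1) := by
        simpa [Qb] using hq
      rw [if_pos hcond, hfg, if_pos hq]
      simp [hcond]
    · have hcond : ¬ a.drop (a.length - (n + 1)) = b.take (n + 1) := by
        simpa [Qb] using hq
      rw [if_neg hcond, hfg, if_neg hq]

lemma pairA_eq (a b : List Char) :
    wmPairA a b = if mm a b = 0 then [] else b.take (mm a b) := by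
  unfold wmPairA
  have hr : List.range (min a.length b.length + 1) = 0 :: List.range' 1 (min a.length b.length) := by
    rw [List.range_eq_range']
    rfl
  rw [hr, List.foldl_cons]
  have h0 : (if PySem.List.slice a (some ((-1) * ((0 : Nat) : Int))) none =
        PySem.List.slice b none (some ((0 : Nat) : Int))
      then PySem.List.slice a (some ((-1) * ((0 : Nat) : Int))) none else ([] : List Char)) = [] := by
    have hz : ((-1) * ((0 : Nat) : Int)) = 0 := by norm_num
    rw [hz]
    by_cases hae : a = [] <;> simp [hae, PySem.List.slice]
  rw [h0, pairA_fold a b (min a.length b.length)]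
  show _ = if mm a b = 0 then [] else b.take (mm a b)
  unfold mm
  by_cases hz : Nat.findGreatest (fun k => Qb a b k = true) (min a.length b.length) = 0
  · rw [if_pos hz, if_pos hz]
  · rw [if_neg hz, if_neg hz]
    have hq := Qb_mm a b
    unfold mm at hq
    simpa [Qb] using hq

lemma loop_eq (l : List (List Char)) (hl : ∀ w ∈ l, '\x00' ∉ w) (sol : List Char) :
    wmLoopA sol l = (wmPiecesB (l.zip l.tail)).map (fun ps => sol ++ ps.flatten) := by
  induction l generalizing sol with
  | nil => simp [wmLoopA, wmPiecesB]
  | cons a t ih =>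
    cases t with
    | nil => simp [wmLoopA, wmPiecesB]
    | cons b rest =>
      have hna : '\x00' ∉ a := hl a (by simp)
      have hnb : '\x00' ∉ b := hl b (by simp)
      have hk : wmOverlapB a b = mm a b := overlapB_eq a b hna hnb
      have hp := pairA_eq a b
      show (if 0 < (wmPairA a b).length then wmLoopA (sol ++ wmPairA a b) (b :: rest) else none) = _
      by_cases hmm : mm a b = 0
      · rw [hp, if_pos hmm]
        simp only [List.length_nil, lt_irrefl, if_false]
        show (none : Option (List Char)) = _
        simp [wmPiecesB, hk, hmm]
      · have hmmb : mm a b ≤ b.length := le_trans (mm_le a b) (min_le_right _ _)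
        have hlen : (wmPairA a b).length = mm a b := by
          rw [hp, if_neg hmm, List.length_take]
          omega
        rw [if_pos (by omega)]
        rw [ih (fun w hw => hl w (by simp [hw])) (sol ++ wmPairA a b)]
        show _ = (wmPiecesB ((a, b) :: (b :: rest).zip rest)).map (fun ps => sol ++ ps.flatten)
        show _ = (let k := wmOverlapB a b;
          if k = 0 then none
          else match wmPiecesB ((b :: rest).zip rest) with
               | some ps => some (b.take k :: ps)
               | none => none).map (fun ps => sol ++ ps.flatten)
        rw [hk]
        simp only [if_neg hmm]
        cases hps : wmPiecesB ((b :: rest).zip rest) with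
        | none => simp [List.tail_cons, hps]
        | some ps =>
          simp only [List.tail_cons, hps, Option.map_some, Option.some.injEq]
          rw [hp, if_neg hmm]
          simp [List.append_assoc]

lemma dom_no_nul (w : String) (h : pvDomStr w = true) : '\x00' ∉ w.toList := by
  intro hm
  have := (List.all_eq_true.mp h) _ hm
  simp [pvDomChar] at this

-- ===== VERDICT (by name: the statement is the Claim_ definition above) =====
lemma join_nil_flatten (ps : List (List Char)) : PySem.Chars.join [] ps = ps.flatten := by
  show List.intercalate [] ps = ps.flatten
  rw [List.intercalate]
  induction ps with
  | nil => rfl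
  | cons x t ih => cases t <;> simp_all [List.intersperse]

theorem word_mesh_spec : Claim_equal_word_mesh := by
  intro words hdom
  show word_mesh words = word_mesh_alt words
  have hl : ∀ w ∈ words.map String.toList, '\x00' ∉ w := by
    intro w hw
    obtain ⟨w', hw', rfl⟩ := List.mem_map.mp hw
    exact dom_no_nul w' (List.all_eq_true.mp hdom w' hw')
  have halt : word_mesh_alt words =
      (match wmPiecesB ((words.map String.toList).zip (words.map String.toList).tail) with
        | some ps => String.ofList (PySem.Chars.join [] ps)
        | none => "failed to mesh") := rfl
  unfold word_mesh
  rw [loop_eq (words.map String.toList) hl [], halt]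
  cases hps : wmPiecesB ((words.map String.toList).zip (words.map String.toList).tail) with
  | none => rfl
  | some ps => simp [join_nil_flatten]
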